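-- pv_equiv track=rewrite | github.com/randysalars/dreamweaving | scripts/automation/youtube_client.py | _trim_tags
-- ===== SOURCE A (Python) =====
-- from typing import Any, Dict, List, Optional
--
-- def _trim_tags(tags: List[str], max_chars: int = 500) -> List[str]:
--     """Trim tags to fit within character limit.
--
--     Args:
--         tags: List of tags
--         max_chars: Maximum total characters
--
--     Returns:
--         Trimmed list of tags
--     """
--     total_chars = 0
--     trimmed = []
--     for tag in tags:
--         tag = tag.strip()
--         # +1 for comma separator
--         if total_chars + len(tag) + 1 <= max_chars:
--             trimmed.append(tag)
--             total_chars += len(tag) + 1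
--         else:
--             break
--     return trimmed
-- ===== SOURCE B (Python) =====
-- from typing import List
--
-- def _trim_tags(tags: List[str], max_chars: int = 500) -> List[str]:
--     """Trim tags to fit within character limit (prefix-sum + binary search)."""
--     stripped = [t.strip() for t in tags]
--     cum = []
--     run = 0
--     for s in stripped:
--         run += len(s) + 1  # +1 for comma separator
--         cum.append(run)
--     # cum is monotonically increasing, so the longest prefix fitting the budget
--     # is found by binary search for the rightmost cum[k] <= max_chars.
--     lo, hi = 0, len(cum)
--     while lo < hi:
--         mid = (lo + hi) // 2
--         if cum[mid] <= max_chars: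
--             lo = mid + 1
--         else:
--             hi = mid
--     return stripped[:lo]
-- ===== Notes on version B (the rewrite author's own statement) =====
-- stated objective: alternative
-- what changed: Replaces A's single running-sum loop with early break by a different decomposition: strip all tags, materialize a prefix-sum table of len+1 increments, binary-search (bisect_right by hand) the monotone table for the cutoff index, and slice the stripped list to it.
import Mathlib
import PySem

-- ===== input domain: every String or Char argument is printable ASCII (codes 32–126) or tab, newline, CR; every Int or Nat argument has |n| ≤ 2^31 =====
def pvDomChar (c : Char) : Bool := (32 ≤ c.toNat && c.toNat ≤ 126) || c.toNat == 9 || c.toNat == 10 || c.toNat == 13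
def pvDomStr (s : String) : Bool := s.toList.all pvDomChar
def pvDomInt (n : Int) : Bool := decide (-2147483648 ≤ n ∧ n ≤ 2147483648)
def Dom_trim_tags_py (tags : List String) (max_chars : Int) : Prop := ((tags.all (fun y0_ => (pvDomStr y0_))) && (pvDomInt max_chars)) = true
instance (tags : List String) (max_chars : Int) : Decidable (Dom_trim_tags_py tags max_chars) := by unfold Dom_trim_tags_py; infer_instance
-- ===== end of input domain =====

-- B replaces A's running-sum loop with an early break by a prefix-sum table plus a
-- binary search for the cutoff index (objective: alternative decomposition, same cost).

-- ===== PORT A =====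
-- A's for-loop with break, as structural recursion over the remaining tags with the
-- running total as state; the break returns the tags accumulated so far.
def trimGoA (max_chars : Int) : List String → Int → List String
  | [], _ => []
  | t :: ts, total =>
    let tag := PySem.Str.strip t
    if total + PySem.Str.len tag + 1 ≤ max_chars then
      tag :: trimGoA max_chars ts (total + PySem.Str.len tag + 1)
    else
      []

def trim_tags_py (tags : List String) (max_chars : Int) : List String :=
  trimGoA max_chars tags 0

-- ===== PORT B =====
-- B's cum-building loop: run += len(s)+1; cum.append(run)
def cumB : List String → Int → List Int
  | [], _ => []
  | s :: ss, run =>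
    let run' := run + PySem.Str.len s + 1
    run' :: cumB ss run'

-- B's binary-search while loop. cum[mid] is ported as pyGetD cum mid 0: exact here,
-- since 0 ≤ lo ≤ mid < hi ≤ len(cum) at every lookup, so the default is never taken.
def bsGo (cum : List Int) (m : Int) (lo hi : Int) : Int :=
  if h : lo < hi then
    let mid := PySem.Int.floordiv (lo + hi) 2
    if PySem.List.pyGetD cum mid 0 ≤ m then bsGo cum m (mid + 1) hi
    else bsGo cum m lo mid
  else lo
termination_by (hi - lo).toNat
decreasing_by
  · have hb := PySem.Int.floordiv_two_mid_bounds (le_of_lt h)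
    omega
  · have hb := PySem.Int.floordiv_two_mid_bounds (le_of_lt h)
    have hlt : PySem.Int.floordiv (lo + hi) 2 < hi :=
      (PySem.Int.floordiv_lt_iff_lt_mul (by omega)).mpr (by omega)
    omega

def trim_tags_py_alt (tags : List String) (max_chars : Int) : List String :=
  let stripped := tags.map PySem.Str.strip
  let cum := cumB stripped 0
  let lo := bsGo cum max_chars 0 (PySem.List.len cum)
  PySem.List.slice stripped none (some lo)

-- ===== PRECONDITION & SPEC =====
def Spec_trim_tags_py (tags : List String) (max_chars : Int) (out : List String) : Prop := out = trim_tags_py_alt tags max_chars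
instance (tags : List String) (max_chars : Int) (out : List String) : Decidable (Spec_trim_tags_py tags max_chars out) := by unfold Spec_trim_tags_py; infer_instance

-- ===== CLAIM (what is proved, stated in full; the proofs are below) =====
def Claim_equal_trim_tags_py : Prop := ∀ (tags : List String) (max_chars : Int), Dom_trim_tags_py tags max_chars → Spec_trim_tags_py tags max_chars (trim_tags_py tags max_chars)

-- ===== LEMMAS AND PROOFS =====

-- number of leading cum entries that fit the budget
def kOf (cum : List Int) (m : Int) : Nat := (cum.takeWhile (fun c => decide (c ≤ m))).length

lemma strLen_nonneg (s : String) : 0 ≤ PySem.Str.len s := by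
  simp [PySem.Str.len_eq]

lemma cumB_mem_lb : ∀ (ss : List String) (run : Int) (x : Int), x ∈ cumB ss run → run + 1 ≤ x := by
  intro ss
  induction ss with
  | nil => intro run x hx; simp [cumB] at hx
  | cons s ss ih =>
    intro run x hx
    simp only [cumB, List.mem_cons] at hx
    have hs := strLen_nonneg s
    rcases hx with h | h
    · omega
    · have := ih (run + PySem.Str.len s + 1) x h
      omega

lemma cumB_pairwise : ∀ (ss : List String) (run : Int), (cumB ss run).Pairwise (· ≤ ·) := by
  intro ss
  induction ss with
  | nil => intro run; simp [cumB]
  | cons s ss ih =>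
    intro run
    simp only [cumB]
    refine List.Pairwise.cons ?_ (ih _)
    intro x hx
    have := cumB_mem_lb ss _ x hx
    omega

lemma pairwise_getD_mono {cum : List Int} (hp : cum.Pairwise (· ≤ ·))
    {i j : Nat} (hij : i ≤ j) (hj : j < cum.length) :
    cum.getD i 0 ≤ cum.getD j 0 := by
  rcases Nat.lt_or_ge i j with h | h
  · have := (List.pairwise_iff_getElem.mp hp) i j (by omega) hj h
    rw [List.getD_eq_getElem _ _ (by omega), List.getD_eq_getElem _ _ hj]
    exact this
  · have : i = j := by omega
    subst this; exact le_rfl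

lemma takeWhile_length_eq {α : Type} (p : α → Bool) (d : α) :
    ∀ (l : List α) (k : Nat), k ≤ l.length →
      (∀ i, i < k → p (l.getD i d) = true) →
      (k < l.length → p (l.getD k d) = false) →
      (l.takeWhile p).length = k := by
  intro l
  induction l with
  | nil => intro k hk _ _; simp at hk; simp [hk]
  | cons a l ih =>
    intro k hk h1 h2
    cases k with
    | zero =>
      have := h2 (by simp)
      simp [List.getD] at this
      simp [List.takeWhile, this]
    | succ k' =>
      have ha : p a = true := by
        have := h1 0 (by omega)
        simpa [List.getD] using this
      simp only [List.takeWhile, ha, List.length_cons]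
      have := ih k' (by simpa using hk)
        (fun i hi => by simpa [List.getD] using h1 (i + 1) (by omega))
        (fun hlt => by simpa [List.getD] using h2 (by simpa using hlt))
      omega

lemma kOf_cons (c : Int) (rest : List Int) (m : Int) :
    kOf (c :: rest) m = if c ≤ m then kOf rest m + 1 else 0 := by
  by_cases h : c ≤ m <;> simp [kOf, h]

lemma cumB_cons (s : String) (ss : List String) (run : Int) :
    cumB (s :: ss) run = (run + PySem.Str.len s + 1) :: cumB ss (run + PySem.Str.len s + 1) := rfl

lemma trimGoA_cons (m : Int) (t : String) (ts : List String) (total : Int) :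
    trimGoA m (t :: ts) total =
      if total + PySem.Str.len (PySem.Str.strip t) + 1 ≤ m then
        PySem.Str.strip t :: trimGoA m ts (total + PySem.Str.len (PySem.Str.strip t) + 1)
      else [] := rfl

-- A's loop computes: take (kOf of the cum table) of the stripped list
lemma trimGoA_eq (m : Int) : ∀ (tags : List String) (total : Int),
    trimGoA m tags total =
      (tags.map PySem.Str.strip).take (kOf (cumB (tags.map PySem.Str.strip) total) m) := by
  intro tags
  induction tags with
  | nil => intro total; simp [trimGoA, cumB, kOf]
  | cons t ts ih =>
    intro total
    rw [trimGoA_cons, List.map_cons, cumB_cons, kOf_cons]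
    split_ifs with hc
    · rw [List.take_succ_cons, ih]
    · rfl

-- the binary search computes kOf, given the invariants and monotonicity
lemma bsGo_eq (cum : List Int) (m : Int)
    (hmono : ∀ i j : Nat, i ≤ j → j < cum.length → cum.getD i 0 ≤ cum.getD j 0) :
    ∀ (n : Nat) (lo hi : Int), (hi - lo).toNat = n → 0 ≤ lo → lo ≤ hi → hi ≤ (cum.length : Int) →
      (∀ i : Nat, i < lo.toNat → cum.getD i 0 ≤ m) →
      (∀ i : Nat, hi.toNat ≤ i → i < cum.length → ¬ cum.getD i 0 ≤ m) →
      bsGo cum m lo hi = (kOf cum m : Int) := by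
  intro n
  induction n using Nat.strong_induction_on with
  | _ n ih =>
    intro lo hi hn hlo0 hlohi hhilen hbelow habove
    rw [bsGo]
    by_cases h : lo < hi
    · simp only [h, dif_pos]
      have hb := PySem.Int.floordiv_two_mid_bounds (le_of_lt h)
      have hltm : PySem.Int.floordiv (lo + hi) 2 < hi :=
        (PySem.Int.floordiv_lt_iff_lt_mul (by omega)).mpr (by omega)
      set mid := PySem.Int.floordiv (lo + hi) 2 with hmid
      have hmid0 : 0 ≤ mid := by omega
      have hmidlen : mid.toNat < cum.length := by omega
      have hget : PySem.List.pyGetD cum mid 0 = cum.getD mid.toNat 0 :=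
        PySem.List.pyGetD_of_nonneg cum 0 hmid0
      by_cases hc : PySem.List.pyGetD cum mid 0 ≤ m
      · rw [if_pos hc]
        refine ih (hi - (mid + 1)).toNat (by omega) (mid + 1) hi rfl (by omega) (by omega) hhilen ?_ habove
        intro i hi'
        have : i ≤ mid.toNat := by omega
        have := hmono i mid.toNat this hmidlen
        rw [hget] at hc
        omega
      · rw [if_neg hc]
        refine ih (mid - lo).toNat (by omega) lo mid rfl hlo0 (by omega) (by omega) hbelow ?_
        intro i hi1 hi2
        have := hmono mid.toNat i (by omega) hi2
        rw [hget] at hc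
        omega
    · rw [dif_neg h]
      have heq : lo = hi := by omega
      have hk : (cum.takeWhile (fun c => decide (c ≤ m))).length = lo.toNat := by
        refine takeWhile_length_eq _ 0 cum lo.toNat (by omega) ?_ ?_
        · intro i hi'; simpa using hbelow i hi'
        · intro hlt
          have := habove lo.toNat (by omega) hlt
          simpa using this
      simp only [kOf, hk]
      omega

-- ===== VERDICT (by name: the statement is the Claim_ definition above) =====
theorem trim_tags_py_spec : Claim_equal_trim_tags_py := by
  intro tags m _
  unfold Spec_trim_tags_py trim_tags_py trim_tags_py_alt
  show trimGoA m tags 0 =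
    PySem.List.slice (tags.map PySem.Str.strip) none
      (some (bsGo (cumB (tags.map PySem.Str.strip) 0) m 0
        (PySem.List.len (cumB (tags.map PySem.Str.strip) 0))))
  set stripped := tags.map PySem.Str.strip with hs
  set cum := cumB stripped 0 with hcum
  have hmono : ∀ i j : Nat, i ≤ j → j < cum.length → cum.getD i 0 ≤ cum.getD j 0 :=
    fun i j hij hj => pairwise_getD_mono (cumB_pairwise stripped 0) hij hj
  have hbs : bsGo cum m 0 (PySem.List.len cum) = (kOf cum m : Int) := by
    refine bsGo_eq cum m hmono ((PySem.List.len cum - 0).toNat) 0 (PySem.List.len cum) rfl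
      le_rfl (by simp [PySem.List.len_eq]) (by simp [PySem.List.len_eq]) ?_ ?_
    · intro i hi'; omega
    · intro i h1 h2
      simp [PySem.List.len_eq] at h1
      omega
  rw [hbs, trimGoA_eq m tags 0, ← hs, ← hcum, PySem.List.slice_to_natCast]
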